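-- pv_equiv track=rewrite | github.com/Kps-96/Cipher-Forge | cipher.py | ascii_to_qwerty
-- ===== SOURCE A (Python) =====
-- QWERTY_MAP = {
--     1: 'Q', 2: 'W', 3: 'E', 4: 'R', 5: 'T', 6: 'Y', 7: 'U', 8: 'I', 9: 'O', 10: 'P',
--     11: 'A', 12: 'S', 13: 'D', 14: 'F', 15: 'G', 16: 'H', 17: 'J', 18: 'K', 19: 'L',
--     20: 'Z', 21: 'X', 22: 'C', 23: 'V', 24: 'B', 25: 'N', 26: 'M'
-- }
--
-- def ascii_to_qwerty(text):
--     length = len(text)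
--     transformed_text = ""
--     for char in text:
--         if char.isalpha():
--             is_upper = char.isupper()
--             ascii_val = ord(char.upper()) - 64  # Convert to 1-26 range
--             new_val = (ascii_val + length) % 26 or 26  # Apply length shift
--             qwerty_char = QWERTY_MAP[new_val]
--             transformed_text += qwerty_char if is_upper else qwerty_char.lower()
--         else:
--             transformed_text += char  # Keep numbers and symbols unchanged
--     return transformed_text
-- ===== SOURCE B (Python) =====
-- def ascii_to_qwerty(text):
--     upper = "QWERTYUIOPASDFGHJKLZXCVBNM"
--     lower = "qwertyuiopasdfghjklzxcvbnm"
--     shift = len(text) % 26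
--     table = {}
--     for i in range(26):
--         table[65 + i] = upper[(i + shift) % 26]
--         table[97 + i] = lower[(i + shift) % 26]
--     return text.translate(table)
-- ===== Notes on version B (the rewrite author's own statement) =====
-- stated objective: faster
-- what changed: B precomputes a 52-entry translation table once from len(text) % 26 (shifted QWERTY layout strings indexed by (i+shift)%26) and applies it with str.translate, instead of A's per-character ord arithmetic, `or 26` wraparound, QWERTY_MAP dict lookup and string concatenation inside the loop.
import Mathlib
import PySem

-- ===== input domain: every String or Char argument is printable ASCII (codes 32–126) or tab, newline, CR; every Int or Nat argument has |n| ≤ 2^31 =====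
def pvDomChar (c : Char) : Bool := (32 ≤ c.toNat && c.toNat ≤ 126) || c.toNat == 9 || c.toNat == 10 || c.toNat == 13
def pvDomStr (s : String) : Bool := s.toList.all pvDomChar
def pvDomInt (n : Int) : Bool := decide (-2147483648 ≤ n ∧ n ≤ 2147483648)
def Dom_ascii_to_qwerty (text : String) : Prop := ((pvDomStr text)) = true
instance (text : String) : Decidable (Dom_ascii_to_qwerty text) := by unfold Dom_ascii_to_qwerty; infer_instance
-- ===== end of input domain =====

-- B replaces the per-character arithmetic+dict-lookup loop by one precomputed 52-entry
-- translation table (built once from len(text) % 26) applied via str.translate.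

-- ===== PORT A =====
def pvQwertyMap : PySem.Dict Int String := PySem.Dict.ofList
  [(1,"Q"),(2,"W"),(3,"E"),(4,"R"),(5,"T"),(6,"Y"),(7,"U"),(8,"I"),(9,"O"),(10,"P"),
   (11,"A"),(12,"S"),(13,"D"),(14,"F"),(15,"G"),(16,"H"),(17,"J"),(18,"K"),(19,"L"),
   (20,"Z"),(21,"X"),(22,"C"),(23,"V"),(24,"B"),(25,"N"),(26,"M")]

-- the piece A's loop appends for one character, literal transliteration of the loop body
def pvStepA (length : Int) (char : Char) : List Char :=
  if PySem.Chars.isalpha char then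
    let is_upper := PySem.Chars.isupper char
    let ascii_val : Int := ((PySem.Chars.upperChar char).toNat : Int) - 64   -- ord(char.upper()) - 64
    let nv := PySem.Int.mod (ascii_val + length) 26
    let new_val := if nv = 0 then 26 else nv                                 -- `… % 26 or 26`
    -- new_val is always in [1,26], so Python's QWERTY_MAP[new_val] never raises KeyError
    let qwerty_char := ((pvQwertyMap.get? new_val).getD "").toList
    if is_upper then qwerty_char else PySem.Chars.lower qwerty_char
  else [char]

def ascii_to_qwerty (text : String) : String :=
  let length : Int := PySem.Str.len text
  String.mk (text.toList.foldl (fun acc char => acc ++ pvStepA length char) [])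

-- ===== PORT B =====
def pvUpperLayout : List Char := "QWERTYUIOPASDFGHJKLZXCVBNM".toList
def pvLowerLayout : List Char := "qwertyuiopasdfghjklzxcvbnm".toList

-- Source B's table-building loop; the indices (i+shift) % 26 are always in range,
-- so Python's upper[...] / lower[...] never raise (the pyGetD default is unreachable)
def pvMakeTable (shift : Int) : PySem.Dict Int Char :=
  (PySem.List.pyRange 0 26 1).foldl (fun d i =>
    (d.insert (65 + i) (PySem.List.pyGetD pvUpperLayout (PySem.Int.mod (i + shift) 26) ' ')).insert
      (97 + i) (PySem.List.pyGetD pvLowerLayout (PySem.Int.mod (i + shift) 26) ' '))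
    PySem.Dict.empty

def ascii_to_qwerty_alt (text : String) : String :=
  let shift : Int := PySem.Int.mod (PySem.Str.len text) 26
  let table := pvMakeTable shift
  -- str.translate with single-character values is a per-character map;
  -- ordinals absent from the table are left unchanged
  String.mk (text.toList.map (fun c => (table.get? ((c.toNat : Nat) : Int)).getD c))

-- ===== PRECONDITION & SPEC =====
def Spec_ascii_to_qwerty (text : String) (out : String) : Prop := out = ascii_to_qwerty_alt text
instance (text : String) (out : String) : Decidable (Spec_ascii_to_qwerty text out) := by unfold Spec_ascii_to_qwerty; infer_instance

-- ===== CLAIM (what is proved, stated in full; the proofs are below) =====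
def Claim_equal_ascii_to_qwerty : Prop := ∀ (text : String), Dom_ascii_to_qwerty text → Spec_ascii_to_qwerty text (ascii_to_qwerty text)

-- ===== LEMMAS AND PROOFS =====

theorem pvIsupper_iff (c : Char) :
    PySem.Chars.isupper c = true ↔ 65 ≤ c.toNat ∧ c.toNat ≤ 90 := by
  simp only [PySem.Chars.isupper, Bool.and_eq_true, decide_eq_true_eq, Char.le_def,
    UInt32.le_iff_toNat_le, Char.toNat_val]
  rw [show 'A'.toNat = 65 from rfl, show 'Z'.toNat = 90 from rfl]

theorem pvIslower_iff (c : Char) :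
    PySem.Chars.islower c = true ↔ 97 ≤ c.toNat ∧ c.toNat ≤ 122 := by
  simp only [PySem.Chars.islower, Bool.and_eq_true, decide_eq_true_eq, Char.le_def,
    UInt32.le_iff_toNat_le, Char.toNat_val]
  rw [show 'a'.toNat = 97 from rfl, show 'z'.toNat = 122 from rfl]

-- the 26 entries of A's QWERTY_MAP against B's two layout strings
theorem pvQLookup (j : Int) (h0 : 0 ≤ j) (h : j < 26) :
    ((pvQwertyMap.get? (j + 1)).getD "").toList = [PySem.List.pyGetD pvUpperLayout j ' '] ∧
    PySem.Chars.lower ((pvQwertyMap.get? (j + 1)).getD "").toList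
      = [PySem.List.pyGetD pvLowerLayout j ' '] := by
  interval_cases j <;> exact ⟨rfl, rfl⟩

-- lookup in the dict built by B's range loop, as a closed form
theorem pvTableGet (u w : Int → Char) (a : Int) (ha0 : 0 ≤ a) (d : PySem.Dict Int Char) (k : Int) :
    ((PySem.List.pyRange a 26 1).foldl
        (fun d i => (d.insert (65 + i) (u i)).insert (97 + i) (w i)) d).get? k =
      if 65 ≤ k ∧ k ≤ 90 ∧ a ≤ k - 65 then some (u (k - 65))
      else if 97 ≤ k ∧ k ≤ 122 ∧ a ≤ k - 97 then some (w (k - 97))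
      else d.get? k := by
  by_cases h : a < 26
  · rw [PySem.List.pyRange_one_cons h]
    simp only [List.foldl_cons]
    rw [pvTableGet u w (a + 1) (by omega)]
    by_cases hk1 : k = 65 + a
    · subst hk1
      rw [if_neg (by omega), if_neg (by omega), if_pos (by omega)]
      rw [PySem.Dict.get?_insert_of_ne _ _ (by omega), PySem.Dict.get?_insert_self]
      have e : (65 : Int) + a - 65 = a := by omega
      rw [e]
    · by_cases hk2 : k = 97 + a
      · subst hk2
        rw [if_neg (by omega), if_neg (by omega), if_neg (by omega), if_pos (by omega)]
        rw [PySem.Dict.get?_insert_self]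
        have e : (97 : Int) + a - 97 = a := by omega
        rw [e]
      · rw [PySem.Dict.get?_insert_of_ne _ _ hk2, PySem.Dict.get?_insert_of_ne _ _ hk1]
        split_ifs <;> first | rfl | omega
  · have he : PySem.List.pyRange a 26 1 = [] := by
      rw [PySem.List.pyRange_one]
      have e : ((26 : Int) - a).toNat = 0 := by omega
      rw [e]
      rfl
    rw [he]
    simp only [List.foldl_nil]
    rw [if_neg (by omega), if_neg (by omega)]
  termination_by (26 - a).toNat
  decreasing_by omega

-- per character, A's appended piece is exactly B's table translation of that character
theorem pvCharStep (L : Int) (c : Char) :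
    pvStepA L c
      = [((pvMakeTable (PySem.Int.mod L 26)).get? ((c.toNat : Nat) : Int)).getD c] := by
  have hmod : ∀ x : Int,
      PySem.Int.mod (x + PySem.Int.mod L 26) 26 = PySem.Int.mod (x + L) 26 := by
    intro x
    simp only [PySem.Int.mod_eq_emod_of_pos (by norm_num : (0:Int) < 26)]
    omega
  unfold pvMakeTable
  rw [pvTableGet (fun i => PySem.List.pyGetD pvUpperLayout (PySem.Int.mod (i + PySem.Int.mod L 26) 26) ' ')
    (fun i => PySem.List.pyGetD pvLowerLayout (PySem.Int.mod (i + PySem.Int.mod L 26) 26) ' ')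
    0 le_rfl]
  set k : Int := ((c.toNat : Nat) : Int) with hk
  by_cases hu : PySem.Chars.isupper c = true
  · have hb := (pvIsupper_iff c).mp hu
    have hlo : PySem.Chars.islower c = false := by
      rw [Bool.eq_false_iff]
      intro h
      have := (pvIslower_iff c).mp h
      omega
    have ha : PySem.Chars.isalpha c = true := by simp [PySem.Chars.isalpha, hu]
    have hup : PySem.Chars.upperChar c = c := by simp [PySem.Chars.upperChar, hlo]
    rw [if_pos (by omega)]
    simp only [hmod]
    set j : Int := PySem.Int.mod (k - 65 + L) 26 with hj
    have hj0 : 0 ≤ j := PySem.Int.mod_nonneg _ (by norm_num)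
    have hj26 : j < 26 := PySem.Int.mod_lt _ (by norm_num)
    have hnv : (if PySem.Int.mod (((PySem.Chars.upperChar c).toNat : Int) - 64 + L) 26 = 0
        then (26 : Int)
        else PySem.Int.mod (((PySem.Chars.upperChar c).toNat : Int) - 64 + L) 26) = j + 1 := by
      rw [hup, hj, hk]
      simp only [PySem.Int.mod_eq_emod_of_pos (by norm_num : (0:Int) < 26)]
      split_ifs with h0 <;> omega
    simp only [pvStepA, ha, if_true, hu, hnv, Option.getD_some]
    exact (pvQLookup j hj0 hj26).1
  · by_cases hl : PySem.Chars.islower c = true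
    · have hb := (pvIslower_iff c).mp hl
      have hu' : PySem.Chars.isupper c = false := Bool.eq_false_iff.mpr hu
      have ha : PySem.Chars.isalpha c = true := by simp [PySem.Chars.isalpha, hl]
      have hup : PySem.Chars.upperChar c = Char.ofNat (c.toNat - 32) := by
        simp [PySem.Chars.upperChar, hl]
      have hvt : (Char.ofNat (c.toNat - 32)).toNat = c.toNat - 32 := by
        rw [Char.toNat_ofNat, if_pos]
        exact Or.inl (by omega)
      rw [if_neg (by omega), if_pos (by omega)]
      simp only [hmod]
      set j : Int := PySem.Int.mod (k - 97 + L) 26 with hj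
      have hj0 : 0 ≤ j := PySem.Int.mod_nonneg _ (by norm_num)
      have hj26 : j < 26 := PySem.Int.mod_lt _ (by norm_num)
      have hnv : (if PySem.Int.mod (((PySem.Chars.upperChar c).toNat : Int) - 64 + L) 26 = 0
          then (26 : Int)
          else PySem.Int.mod (((PySem.Chars.upperChar c).toNat : Int) - 64 + L) 26) = j + 1 := by
        rw [hup, hvt, hj, hk]
        have ek : ((c.toNat - 32 : Nat) : Int) = ((c.toNat : Nat) : Int) - 32 := by omega
        rw [ek]
        simp only [PySem.Int.mod_eq_emod_of_pos (by norm_num : (0:Int) < 26)]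
        split_ifs with h0 <;> omega
      simp only [pvStepA, ha, if_true, hu', hnv, Option.getD_some, Bool.false_eq_true, if_false]
      exact (pvQLookup j hj0 hj26).2
    · have hu' : PySem.Chars.isupper c = false := Bool.eq_false_iff.mpr hu
      have hl' : PySem.Chars.islower c = false := Bool.eq_false_iff.mpr hl
      have hb1 : ¬(65 ≤ c.toNat ∧ c.toNat ≤ 90) := fun h => hu ((pvIsupper_iff c).mpr h)
      have hb2 : ¬(97 ≤ c.toNat ∧ c.toNat ≤ 122) := fun h => hl ((pvIslower_iff c).mpr h)
      have ha : PySem.Chars.isalpha c = false := by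
        simp [PySem.Chars.isalpha, hu', hl']
      rw [if_neg (by omega), if_neg (by omega)]
      simp [pvStepA, ha, PySem.Dict.get?_empty]

-- a loop appending one-element pieces is a map
theorem pvFlatMapSingleton (l : List Char) (g : Char → List Char) (f : Char → Char)
    (h : ∀ c, g c = [f c]) : l.flatMap g = l.map f := by
  induction l with
  | nil => rfl
  | cons x xs ih => simp only [List.flatMap_cons, List.map_cons, h x, ih, List.singleton_append]

-- ===== VERDICT (by name: the statement is the Claim_ definition above) =====
theorem ascii_to_qwerty_spec : Claim_equal_ascii_to_qwerty := by
  intro text _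
  show String.mk (text.toList.foldl
      (fun acc char => acc ++ pvStepA (PySem.Str.len text) char) [])
    = String.mk (text.toList.map (fun c =>
        ((pvMakeTable (PySem.Int.mod (PySem.Str.len text) 26)).get? ((c.toNat : Nat) : Int)).getD c))
  rw [PySem.List.foldl_append_eq_flatMap]
  simp only [List.nil_append]
  congr 1
  exact pvFlatMapSingleton _ _ _
    (pvCharStep (PySem.Str.len text))
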